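-- pv_equiv track=rewrite | github.com/raaja-g/specweaver-ai | backend/core/locator_manager.py | _get_common_attributes
-- ===== SOURCE A (Python) =====
-- from typing import Dict, List, Any, Optional, Tuple
--
-- def _get_common_attributes(element_name: str) -> List[str]:
--     """Get common attributes to look for"""
--     base_attrs = ["data-testid", "id", "name", "class"]
--
--     if any(word in element_name.lower() for word in ['button', 'click', 'submit']):
--         base_attrs.extend(["type", "onclick", "aria-label"])
--     elif any(word in element_name.lower() for word in ['input', 'field']):
--         base_attrs.extend(["type", "placeholder", "aria-label"])
--     elif any(word in element_name.lower() for word in ['link', 'nav']):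
--         base_attrs.extend(["href", "role"])
--
--     return base_attrs
-- ===== SOURCE B (Python) =====
-- from typing import List
--
-- # keyword -> priority group (0 = button group, 1 = input group, 2 = link group)
-- _KEYWORD_GROUP = {
--     "button": 0, "click": 0, "submit": 0,
--     "input": 1, "field": 1,
--     "link": 2, "nav": 2,
-- }
-- _GROUP_EXTRAS = [
--     ["type", "onclick", "aria-label"],
--     ["type", "placeholder", "aria-label"],
--     ["href", "role"],
-- ]
--
-- def _get_common_attributes(element_name: str) -> List[str]:
--     """Get common attributes to look for"""
--     lname = element_name.lower()
--     matched = [g for kw, g in _KEYWORD_GROUP.items() if kw in lname]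
--     attrs = ["data-testid", "id", "name", "class"]
--     if matched:
--         attrs += _GROUP_EXTRAS[min(matched)]
--     return attrs
-- ===== Notes on version B (the rewrite author's own statement) =====
-- stated objective: alternative
-- what changed: Replaces the short-circuiting if/elif ladder by an exhaustive scan: a flat keyword-to-priority map is checked for every keyword, all matching priorities are collected, and the minimum priority selects the extra attributes (elif = lowest matching group).
import Mathlib
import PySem

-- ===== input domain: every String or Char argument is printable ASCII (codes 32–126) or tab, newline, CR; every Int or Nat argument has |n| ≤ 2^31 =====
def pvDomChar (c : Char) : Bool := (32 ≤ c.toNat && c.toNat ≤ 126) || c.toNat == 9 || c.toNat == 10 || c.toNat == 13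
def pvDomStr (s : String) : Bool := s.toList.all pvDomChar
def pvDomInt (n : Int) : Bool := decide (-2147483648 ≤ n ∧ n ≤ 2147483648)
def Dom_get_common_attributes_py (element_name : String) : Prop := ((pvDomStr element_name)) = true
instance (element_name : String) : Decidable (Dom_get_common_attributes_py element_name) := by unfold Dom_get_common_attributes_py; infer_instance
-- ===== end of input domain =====

-- B replaces the if/elif ladder by an exhaustive keyword->priority scan whose minimum matched priority picks the extras (alternative decomposition; equal return value).


-- ===== PORT A =====
def get_common_attributes_py (element_name : String) : List String :=
  let base_attrs := ["data-testid", "id", "name", "class"]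
  if ["button", "click", "submit"].any (fun word => PySem.Str.isIn word (PySem.Str.lower element_name)) then
    base_attrs ++ ["type", "onclick", "aria-label"]
  else if ["input", "field"].any (fun word => PySem.Str.isIn word (PySem.Str.lower element_name)) then
    base_attrs ++ ["type", "placeholder", "aria-label"]
  else if ["link", "nav"].any (fun word => PySem.Str.isIn word (PySem.Str.lower element_name)) then
    base_attrs ++ ["href", "role"]
  else
    base_attrs

-- ===== PORT B =====
-- keyword -> priority group, checked exhaustively (no short-circuit)
def pvKeywordGroup : List (String × Int) :=
  [("button", 0), ("click", 0), ("submit", 0),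
   ("input", 1), ("field", 1),
   ("link", 2), ("nav", 2)]

def pvGroupExtras : List (List String) :=
  [["type", "onclick", "aria-label"],
   ["type", "placeholder", "aria-label"],
   ["href", "role"]]

def get_common_attributes_py_alt (element_name : String) : List String :=
  let lname := PySem.Str.lower element_name
  let matched := pvKeywordGroup.filterMap
    (fun p => if PySem.Str.isIn p.1 lname then some p.2 else none)
  let attrs := ["data-testid", "id", "name", "class"]
  if matched ≠ [] then
    -- _GROUP_EXTRAS[min(matched)]; index is always 0..2, so pyGet? never misses
    attrs ++ (match PySem.List.min? matched (fun g => g) with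
              | some g => (PySem.List.pyGet? pvGroupExtras g).getD []
              | none => [])
  else attrs

-- ===== PRECONDITION & SPEC =====
def Spec_get_common_attributes_py (element_name : String) (out : List String) : Prop := out = get_common_attributes_py_alt element_name
instance (element_name : String) (out : List String) : Decidable (Spec_get_common_attributes_py element_name out) := by unfold Spec_get_common_attributes_py; infer_instance

-- ===== CLAIM (what is proved, stated in full; the proofs are below) =====
def Claim_equal_get_common_attributes_py : Prop := ∀ (element_name : String), Dom_get_common_attributes_py element_name → Spec_get_common_attributes_py element_name (get_common_attributes_py element_name)

-- ===== LEMMAS AND PROOFS =====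

-- ===== VERDICT (by name: the statement is the Claim_ definition above) =====
set_option maxHeartbeats 4000000 in
theorem get_common_attributes_py_spec : Claim_equal_get_common_attributes_py := by
  intro s _
  unfold Spec_get_common_attributes_py get_common_attributes_py get_common_attributes_py_alt pvKeywordGroup pvGroupExtras
  cases h1 : PySem.Str.isIn "button" (PySem.Str.lower s) <;>
  cases h2 : PySem.Str.isIn "click" (PySem.Str.lower s) <;>
  cases h3 : PySem.Str.isIn "submit" (PySem.Str.lower s) <;>
  cases h4 : PySem.Str.isIn "input" (PySem.Str.lower s) <;>
  cases h5 : PySem.Str.isIn "field" (PySem.Str.lower s) <;>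
  cases h6 : PySem.Str.isIn "link" (PySem.Str.lower s) <;>
  cases h7 : PySem.Str.isIn "nav" (PySem.Str.lower s) <;>
  simp only [List.any_cons, List.any_nil, h1, h2, h3, h4, h5, h6, h7, List.filterMap,
    Bool.or_false, Bool.or_self, if_true, if_false, Bool.or_true,
    ne_eq, reduceCtorEq, not_false_iff, not_true] <;>
  first
    | rfl
    | (norm_num [PySem.List.min?, PySem.List.pyGet?, PySem.List.pyIdx?])
    | decide
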